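-- pv_equiv track=rewrite | github.com/6snowyfox6/graf-agent | pipeline/critic.py | build_followup_patch_plan
-- ===== SOURCE A (Python) =====
-- def build_followup_patch_plan(patch_plan: dict, verify_json: dict) -> dict:
--     unresolved_map = {
--         str(item.get("issue", "")).strip().lower()
--         for item in verify_json.get("items", [])
--         if str(item.get("status", "")).lower() in {"partial", "ignored"}
--     }
--
--     unresolved = [
--         item
--         for item in patch_plan.get("must_fix", [])
--         if str(item.get("issue", "")).strip().lower() in unresolved_map
--     ]
--
--     return {
--         "must_fix": unresolved,
--         "optional": [],
--         "hard_constraints": patch_plan.get("hard_constraints", []),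
--     }
-- ===== SOURCE B (Python) =====
-- def build_followup_patch_plan(patch_plan: dict, verify_json: dict) -> dict:
--     must_fix = patch_plan.get("must_fix", [])
--     keys = [str(it.get("issue", "")).strip().lower() for it in must_fix]
--     flags = [False] * len(keys)
--     for v in verify_json.get("items", []):
--         if str(v.get("status", "")).lower() in ("partial", "ignored"):
--             vkey = str(v.get("issue", "")).strip().lower()
--             flags = [f or k == vkey for k, f in zip(keys, flags)]
--     return {
--         "must_fix": [it for it, f in zip(must_fix, flags) if f],
--         "optional": [],
--         "hard_constraints": patch_plan.get("hard_constraints", []),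
--     }
-- ===== Notes on version B (the rewrite author's own statement) =====
-- stated objective: alternative
-- what changed: Inverts the traversal: instead of building a set of unresolved issues and filtering must_fix by membership, B drives the outer loop over verify items, marking a parallel boolean flags array over must_fix (one zip pass per unresolved verify item), and finally keeps the flagged must_fix entries with a zip-filter pass.
import Mathlib
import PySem

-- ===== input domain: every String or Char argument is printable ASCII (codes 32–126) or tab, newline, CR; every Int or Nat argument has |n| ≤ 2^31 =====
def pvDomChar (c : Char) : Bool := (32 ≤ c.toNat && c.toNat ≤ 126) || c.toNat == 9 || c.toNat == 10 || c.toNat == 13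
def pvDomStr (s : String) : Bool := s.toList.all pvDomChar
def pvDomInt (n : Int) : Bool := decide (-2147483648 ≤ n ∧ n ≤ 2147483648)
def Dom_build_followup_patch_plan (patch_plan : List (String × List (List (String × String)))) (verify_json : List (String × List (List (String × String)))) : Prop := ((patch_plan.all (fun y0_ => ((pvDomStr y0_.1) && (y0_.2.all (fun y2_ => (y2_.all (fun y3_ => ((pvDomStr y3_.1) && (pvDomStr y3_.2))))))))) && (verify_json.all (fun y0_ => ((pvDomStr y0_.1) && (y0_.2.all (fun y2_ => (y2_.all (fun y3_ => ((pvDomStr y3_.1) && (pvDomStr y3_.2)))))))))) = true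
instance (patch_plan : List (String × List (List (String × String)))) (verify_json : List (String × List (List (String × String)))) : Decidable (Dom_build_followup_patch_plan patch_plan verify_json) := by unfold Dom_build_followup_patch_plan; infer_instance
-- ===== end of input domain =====

-- B inverts the traversal: an outer loop over the verify items marks a parallel boolean flags array over must_fix, then one zip-filter pass keeps the flagged entries (alternative decomposition, same results).
-- ===== PORT A =====
-- dict.get(k, dflt) on an association list: first match, else the default (shared by both ports)
def pvGetD (d : List (String × List (List (String × String)))) (k : String) (dflt : List (List (String × String))) : List (List (String × String)) :=
  (d.lookup k).getD dflt

-- item.get(k, "") on an inner dict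
def pvGetS (d : List (String × String)) (k : String) : String :=
  (d.lookup k).getD ""

def build_followup_patch_plan (patch_plan : List (String × List (List (String × String)))) (verify_json : List (String × List (List (String × String)))) : List (String × List (List (String × String))) :=
  let unresolved_map : PySem.Set String :=
    PySem.Set.ofList
      (((pvGetD verify_json "items" []).filter
          (fun item => let s := PySem.Str.lower (pvGetS item "status");
            s == "partial" || s == "ignored")).map
        (fun item => PySem.Str.lower (PySem.Str.strip (pvGetS item "issue"))))
  let unresolved :=
    (pvGetD patch_plan "must_fix" []).filter
      (fun item => unresolved_map.contains (PySem.Str.lower (PySem.Str.strip (pvGetS item "issue"))))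
  [("must_fix", unresolved), ("optional", []), ("hard_constraints", pvGetD patch_plan "hard_constraints" [])]

-- ===== PORT B =====
def build_followup_patch_plan_alt (patch_plan : List (String × List (List (String × String)))) (verify_json : List (String × List (List (String × String)))) : List (String × List (List (String × String))) :=
  let must_fix := pvGetD patch_plan "must_fix" []
  let keys := must_fix.map (fun it => PySem.Str.lower (PySem.Str.strip (pvGetS it "issue")))
  let flags :=
    (pvGetD verify_json "items" []).foldl
      (fun flags v =>
        if (let s := PySem.Str.lower (pvGetS v "status"); s == "partial" || s == "ignored")
        then
          let vkey := PySem.Str.lower (PySem.Str.strip (pvGetS v "issue"))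
          (keys.zip flags).map (fun p => p.2 || (p.1 == vkey))
        else flags)
      (List.replicate keys.length false)
  [("must_fix", ((must_fix.zip flags).filter (fun p => p.2)).map (fun p => p.1)),
   ("optional", []),
   ("hard_constraints", pvGetD patch_plan "hard_constraints" [])]

-- ===== PRECONDITION & SPEC =====
def Spec_build_followup_patch_plan (patch_plan : List (String × List (List (String × String)))) (verify_json : List (String × List (List (String × String)))) (out : List (String × List (List (String × String)))) : Prop := out = build_followup_patch_plan_alt patch_plan verify_json
instance (patch_plan : List (String × List (List (String × String)))) (verify_json : List (String × List (List (String × String)))) (out : List (String × List (List (String × String)))) : Decidable (Spec_build_followup_patch_plan patch_plan verify_json out) := by unfold Spec_build_followup_patch_plan; infer_instance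

-- ===== CLAIM (what is proved, stated in full; the proofs are below) =====
def Claim_equal_build_followup_patch_plan : Prop := ∀ (patch_plan : List (String × List (List (String × String)))) (verify_json : List (String × List (List (String × String)))), Dom_build_followup_patch_plan patch_plan verify_json → Spec_build_followup_patch_plan patch_plan verify_json (build_followup_patch_plan patch_plan verify_json)

-- ===== LEMMAS AND PROOFS =====
-- one marking pass over (keys.zip flags), with flags pointwise keys.map g, is a pointwise 'or' on the mapped function
theorem pv_zip_map_or {α : Type} (keys : List α) (g : α → Bool) (q : α → Bool) :
    ((keys.zip (keys.map g)).map (fun p => p.2 || q p.1))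
      = keys.map (fun k => g k || q k) := by
  induction keys with
  | nil => rfl
  | cons k ks ih => simp only [List.map_cons, List.zip_cons_cons, ih]

-- the whole verify fold keeps flags pointwise: flag of k = g k || any unresolved verify item matching k
theorem pv_flags_fold {α β : Type} (vs : List β) (keys : List α) (cond : β → Bool)
    (vk : β → α) [DecidableEq α] (g : α → Bool) :
    vs.foldl
      (fun flags v =>
        if cond v then (keys.zip flags).map (fun p => p.2 || (p.1 == vk v)) else flags)
      (keys.map g)
    = keys.map (fun k => g k || vs.any (fun v => cond v && (k == vk v))) := by
  induction vs generalizing g with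
  | nil => simp
  | cons v vs ih =>
    by_cases h : cond v = true
    · simp only [List.foldl_cons, h, if_pos]
      rw [pv_zip_map_or keys g (fun k => k == vk v), ih]
      apply List.map_congr_left
      intro k _
      simp [h, Bool.or_assoc]
    · simp only [List.foldl_cons, h, Bool.false_eq_true, if_neg, not_false_iff]
      rw [ih]
      apply List.map_congr_left
      intro k _
      simp [h]

-- keeping the flagged entries of (xs.zip (xs.map p)) is filtering xs by p
theorem pv_zip_filter {α : Type} (xs : List α) (p : α → Bool) :
    (((xs.zip (xs.map p)).filter (fun q => q.2)).map (fun q => q.1)) = xs.filter p := by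
  induction xs with
  | nil => rfl
  | cons x xs ih =>
    by_cases h : p x = true <;>
      simp only [List.map_cons, List.zip_cons_cons, List.filter_cons, h, if_pos, if_neg,
        Bool.false_eq_true, not_false_iff, List.map_cons, ih]

-- membership of a normalized key in A's set = an any(...) scan of the verify items
theorem pv_contains_eq_any (vitems : List (List (String × String))) (key : String) :
    (PySem.Set.ofList
      ((vitems.filter (fun item =>
          PySem.Str.lower (pvGetS item "status") == "partial" ||
          PySem.Str.lower (pvGetS item "status") == "ignored")).map
        (fun item => PySem.Str.lower (PySem.Str.strip (pvGetS item "issue"))))).contains key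
    = vitems.any (fun v =>
        (PySem.Str.lower (pvGetS v "status") == "partial" ||
         PySem.Str.lower (pvGetS v "status") == "ignored")
        && (key == PySem.Str.lower (PySem.Str.strip (pvGetS v "issue")))) := by
  rw [Bool.eq_iff_iff]
  simp [PySem.Set.mem_ofList, List.mem_filter, List.any_eq_true]
  constructor
  · rintro ⟨v, ⟨hv, hs⟩, hk⟩; exact ⟨v, hv, hs, hk.symm⟩
  · rintro ⟨v, hv, hs, hk⟩; exact ⟨v, ⟨hv, hs⟩, hk.symm⟩

-- ===== VERDICT (by name: the statement is the Claim_ definition above) =====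
theorem build_followup_patch_plan_spec : Claim_equal_build_followup_patch_plan := by
  intro patch_plan verify_json _
  unfold Spec_build_followup_patch_plan build_followup_patch_plan build_followup_patch_plan_alt
  have hrep : List.replicate ((pvGetD patch_plan "must_fix" []).map
      (fun it => PySem.Str.lower (PySem.Str.strip (pvGetS it "issue")))).length false
      = ((pvGetD patch_plan "must_fix" []).map
          (fun it => PySem.Str.lower (PySem.Str.strip (pvGetS it "issue")))).map (fun _ => false) := by
    rw [List.map_const', List.length_map]
  simp only [hrep]
  rw [pv_flags_fold (pvGetD verify_json "items" []) _ _ _ (fun _ => false)]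
  simp only [Bool.false_or, List.map_map]
  rw [pv_zip_filter]
  congr 2
  apply List.filter_congr
  intro item _
  simp only [Function.comp_apply]
  rw [pv_contains_eq_any]
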